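-- pv_equiv track=rewrite | github.com/vaishnn/PacMan | library/library.py | rankQuery
-- ===== SOURCE A (Python) =====
-- def rankQuery(dataList, query):
--     lowerQuery = query.lower()
--     matches = [
--         item for item in dataList
--         if lowerQuery in item['name'].lower()
--     ]
--     sortedMatches = sorted(
--         matches,
--         key=lambda item: item['name'].lower().find(lowerQuery)
--     )
--     return sortedMatches
-- ===== SOURCE B (Python) =====
-- def rankQuery(dataList, query):
--     lowerQuery = query.lower()
--     positions = [item['name'].lower().find(lowerQuery) for item in dataList]
--     maxPos = max(positions, default=-1)
--     result = []
--     for p in range(maxPos + 1):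
--         for item, pos in zip(dataList, positions):
--             if pos == p:
--                 result.append(item)
--     return result
-- ===== Notes on version B (the rewrite author's own statement) =====
-- stated objective: alternative
-- what changed: Replaces filter-then-comparison-sort by a pigeonhole/distribution collection: compute each name's match position once, then sweep positions 0..maxPos in increasing order emitting matching items in input order, so no sort (and no separate filter stage) is performed at all.
import Mathlib
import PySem

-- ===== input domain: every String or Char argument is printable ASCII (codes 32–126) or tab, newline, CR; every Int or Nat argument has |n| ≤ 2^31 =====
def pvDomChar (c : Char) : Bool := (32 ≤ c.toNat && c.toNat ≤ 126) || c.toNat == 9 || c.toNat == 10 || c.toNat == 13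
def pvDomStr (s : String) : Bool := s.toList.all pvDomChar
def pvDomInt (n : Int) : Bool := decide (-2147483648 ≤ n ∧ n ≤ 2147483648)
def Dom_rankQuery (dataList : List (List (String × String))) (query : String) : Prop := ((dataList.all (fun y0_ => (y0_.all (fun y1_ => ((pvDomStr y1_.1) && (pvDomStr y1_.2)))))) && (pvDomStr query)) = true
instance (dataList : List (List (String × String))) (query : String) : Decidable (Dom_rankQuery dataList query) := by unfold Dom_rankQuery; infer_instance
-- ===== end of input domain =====

-- B replaces filter-then-sort by a pigeonhole/distribution collection (sweep match positions 0..maxPos, emit matching items in input order); same results, no speed claim.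

-- ===== PORT A =====
-- item['name'] under Pre_ (the key is present); getD "" is the total form
def pvName (item : List (String × String)) : String :=
  ((PySem.Dict.mk item).get? "name").getD ""

def rankQuery (dataList : List (List (String × String))) (query : String) : List (List (String × String)) :=
  let lowerQuery := PySem.Str.lower query
  let matched := dataList.filter (fun item => PySem.Str.isIn lowerQuery (PySem.Str.lower (pvName item)))
  PySem.List.sorted matched (fun item => PySem.Str.find (PySem.Str.lower (pvName item)) lowerQuery) false

-- ===== PORT B =====
def rankQuery_alt (dataList : List (List (String × String))) (query : String) : List (List (String × String)) :=
  let lowerQuery := PySem.Str.lower query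
  let positions := dataList.map (fun item => PySem.Str.find (PySem.Str.lower (pvName item)) lowerQuery)
  let maxPos := (PySem.List.max? positions (fun x => x)).getD (-1)
  (PySem.List.pyRange 0 (maxPos + 1)).foldl (fun acc p =>
    (dataList.zip positions).foldl (fun acc t => if t.2 == p then acc ++ [t.1] else acc) acc) []

-- ===== PRECONDITION & SPEC =====
-- Pre_ excludes items missing the key 'name', on which Python A raises KeyError (B raises there too).
def Pre_rankQuery (dataList : List (List (String × String))) (query : String) : Prop :=
  dataList.all (fun item => item.any (fun p => p.1 == "name")) = true
instance (dataList : List (List (String × String))) (query : String) : Decidable (Pre_rankQuery dataList query) := by unfold Pre_rankQuery; infer_instance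
def pvWitness_rankQuery : (List (List (String × String))) × String :=
  ([[("name", "Apple")], [("name", "pear")]], "a")

def Spec_rankQuery (dataList : List (List (String × String))) (query : String) (out : List (List (String × String))) : Prop := out = rankQuery_alt dataList query
instance (dataList : List (List (String × String))) (query : String) (out : List (List (String × String))) : Decidable (Spec_rankQuery dataList query out) := by unfold Spec_rankQuery; infer_instance

-- ===== CLAIM (what is proved, stated in full; the proofs are below) =====
def Claim_equal_rankQuery : Prop := ∀ (dataList : List (List (String × String))) (query : String), Dom_rankQuery dataList query → Pre_rankQuery dataList query → Spec_rankQuery dataList query (rankQuery dataList query)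

-- ===== LEMMAS AND PROOFS =====

-- find.go returns -1 or a value ≥ its start index
theorem pv_find_go_cases (sub : List Char) : ∀ (s : List Char) (k : Nat),
    PySem.Chars.find.go sub s k = -1 ∨ (k : Int) ≤ PySem.Chars.find.go sub s k := by
  intro s
  induction s with
  | nil =>
    intro k
    simp only [PySem.Chars.find.go]
    split_ifs <;> simp
  | cons h t ih =>
    intro k
    simp only [PySem.Chars.find.go]
    split_ifs with hp
    · right; simp
    · rcases ih (k + 1) with h1 | h1
      · left; exact h1
      · right; exact le_trans (by exact_mod_cast Nat.le_succ k) h1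

-- find is -1 or nonnegative
theorem pv_find_cases (s sub : String) :
    PySem.Str.find s sub = -1 ∨ 0 ≤ PySem.Str.find s sub := by
  unfold PySem.Str.find PySem.Chars.find
  exact pv_find_go_cases sub.toList s.toList 0

-- find ≠ -1 ↔ substring membership, as a Bool equation
theorem pv_find_isIn (s sub : String) :
    decide (PySem.Str.find s sub ≠ -1) = PySem.Str.isIn sub s := by
  by_cases h : sub.toList <:+: s.toList
  · rw [(PySem.Str.isIn_iff_infix sub s).mpr h]
    exact decide_eq_true ((PySem.Str.find_ne_neg_one_iff s sub).mpr h)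
  · have h2 : PySem.Str.isIn sub s = false := by
      rw [← Bool.not_eq_true, PySem.Str.isIn_iff_infix]; exact h
    rw [h2]
    exact decide_eq_false (fun hc => hc ((PySem.Str.find_eq_neg_one_iff s sub).mpr h))

-- insertBy skips a prefix it never inserts before
theorem pv_insertBy_append {α : Type} (bf : α → α → Bool) (x : α) (as bs : List α)
    (h : ∀ y ∈ as, bf x y = false) :
    PySem.List.insertBy bf x (as ++ bs) = as ++ PySem.List.insertBy bf x bs := by
  induction as with
  | nil => rfl
  | cons a t ih =>
    simp only [List.cons_append, PySem.List.insertBy]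
    rw [h a (List.mem_cons_self), ih (fun y hy => h y (List.mem_cons_of_mem a hy))]
    simp

-- insertBy prepends when it inserts before everything
theorem pv_insertBy_front {α : Type} (bf : α → α → Bool) (x : α) (bs : List α)
    (h : ∀ y ∈ bs, bf x y = true) :
    PySem.List.insertBy bf x bs = x :: bs := by
  cases bs with
  | nil => rfl
  | cons b t =>
    simp only [PySem.List.insertBy]
    rw [h b (List.mem_cons_self)]
    simp

-- a member of the bucketed list has its key in the bucket index list
theorem pv_mem_buckets {α : Type} (key : α → Int) (xs : List α) (L : List Int) (y : α)
    (hy : y ∈ L.flatMap (fun p => xs.filter (fun z => key z == p))) : key y ∈ L := by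
  rcases List.mem_flatMap.mp hy with ⟨p, hp, hyp⟩
  rcases List.mem_filter.mp hyp with ⟨_, hk⟩
  rwa [(beq_iff_eq).mp hk]

-- inserting x into the bucketed list appends it to its own bucket
theorem pv_insertBy_buckets {α : Type} (key : α → Int) (x : α) (xs : List α) :
    ∀ (L : List Int), L.Pairwise (· < ·) → key x ∈ L →
    PySem.List.insertBy (fun a b => decide (key a < key b)) x
        (L.flatMap (fun p => xs.filter (fun z => key z == p)))
      = L.flatMap (fun p => (xs ++ [x]).filter (fun z => key z == p)) := by
  intro L
  induction L with
  | nil => intro _ hx; exact absurd hx (List.not_mem_nil)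
  | cons q L' ih =>
    intro hpw hx
    have hpw' : L'.Pairwise (· < ·) := (List.pairwise_cons.mp hpw).2
    have hqlt : ∀ p ∈ L', q < p := (List.pairwise_cons.mp hpw).1
    simp only [List.flatMap_cons]
    by_cases hq : key x = q
    · -- x belongs to the head bucket
      rw [pv_insertBy_append _ _ _ _ (fun y hy => by
          rcases List.mem_filter.mp hy with ⟨_, hk⟩
          simp [hq, (beq_iff_eq).mp hk])]
      rw [pv_insertBy_front _ _ _ (fun y hy => by
          have hky := pv_mem_buckets key xs L' y hy
          simp [hq, hqlt _ hky])]
      have hhead : (xs ++ [x]).filter (fun z => key z == q) =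
          xs.filter (fun z => key z == q) ++ [x] := by
        simp [List.filter_append, hq]
      have htail : L'.flatMap (fun p => (xs ++ [x]).filter (fun z => key z == p)) =
          L'.flatMap (fun p => xs.filter (fun z => key z == p)) := by
        apply List.flatMap_congr
        intro p hp
        have : key x ≠ p := by
          have h1 := hqlt p hp; omega
        simp [List.filter_append, this]
      rw [hhead, htail]
      simp
    · -- x belongs to a later bucket
      have hx' : key x ∈ L' := by
        rcases List.mem_cons.mp hx with h | h
        · exact absurd h hq
        · exact h
      rw [pv_insertBy_append _ _ _ _ (fun y hy => by
          rcases List.mem_filter.mp hy with ⟨_, hk⟩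
          have : q < key x := hqlt _ hx'
          simp [(beq_iff_eq).mp hk, not_lt.mpr (le_of_lt this)])]
      rw [ih hpw' hx']
      have hhead : (xs ++ [x]).filter (fun z => key z == q) =
          xs.filter (fun z => key z == q) := by
        simp [List.filter_append, hq]
      rw [hhead]

-- stable sort = concatenation of the equal-key buckets in increasing key order
theorem pv_sorted_buckets {α : Type} (key : α → Int) :
    ∀ (xs : List α) (L : List Int), L.Pairwise (· < ·) → (∀ x ∈ xs, key x ∈ L) →
    PySem.List.sorted xs key false = L.flatMap (fun p => xs.filter (fun z => key z == p)) := by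
  intro xs
  induction xs using List.reverseRecOn with
  | nil => intro L _ _; simp [PySem.List.sorted_eq_foldl_insertBy]
  | append_singleton xs x ih =>
    intro L hpw hmem
    rw [PySem.List.sorted_eq_foldl_insertBy, List.foldl_append, List.foldl_cons, List.foldl_nil,
        ← PySem.List.sorted_eq_foldl_insertBy,
        ih L hpw (fun y hy => hmem y (List.mem_append_left _ hy))]
    exact pv_insertBy_buckets key x xs L hpw (hmem x (by simp))

-- for p ≥ 0, the bucket of dataList equals the bucket of the matched sublist
theorem pv_filter_matched (dataList : List (List (String × String))) (lq : String) (p : Int)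
    (hp0 : 0 ≤ p) :
    dataList.filter (fun z => PySem.Str.find (PySem.Str.lower (pvName z)) lq == p)
    = (dataList.filter (fun item => PySem.Str.isIn lq (PySem.Str.lower (pvName item)))).filter
        (fun z => PySem.Str.find (PySem.Str.lower (pvName z)) lq == p) := by
  rw [List.filter_filter]
  apply List.filter_congr
  intro z _
  by_cases hz : PySem.Str.find (PySem.Str.lower (pvName z)) lq = p
  · have hin : PySem.Str.isIn lq (PySem.Str.lower (pvName z)) = true := by
      rw [← pv_find_isIn]
      exact decide_eq_true (by omega)
    have h1 : (PySem.Str.find (PySem.Str.lower (pvName z)) lq == p) = true := beq_iff_eq.mpr hz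
    rw [h1, hin, Bool.and_self]
  · have h1 : (PySem.Str.find (PySem.Str.lower (pvName z)) lq == p) = false :=
      beq_eq_false_iff_ne.mpr hz
    rw [h1, Bool.false_and]

-- ===== VERDICT (by name: the statement is the Claim_ definition above) =====
theorem rankQuery_spec : Claim_equal_rankQuery := by
  intro dataList query _ _
  unfold Spec_rankQuery rankQuery rankQuery_alt
  simp only []
  set lq := PySem.Str.lower query with hlq
  set key : List (String × String) → Int :=
    fun item => PySem.Str.find (PySem.Str.lower (pvName item)) lq with hkey
  set maxPos := ((PySem.List.max? (dataList.map key) (fun x => x)).getD (-1)) with hmax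
  -- B's inner loop appends the bucket of p
  have hzip : dataList.zip (dataList.map key) = dataList.map (fun x => (x, key x)) := by
    simpa using (@List.zip_map' _ _ _ id key dataList)
  have hstep : ∀ (p : Int) (acc : List (List (String × String))),
      (dataList.zip (dataList.map key)).foldl
          (fun acc t => if t.2 == p then acc ++ [t.1] else acc) acc
      = acc ++ dataList.filter (fun z => key z == p) := by
    intro p acc
    rw [hzip, List.foldl_map]
    simpa using PySem.List.foldl_append_if (fun z => key z == p)
      (fun z : List (String × String) => z) dataList acc
  have hfun : (fun (acc : List (List (String × String))) (p : Int) =>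
      (dataList.zip (dataList.map key)).foldl
        (fun acc t => if t.2 == p then acc ++ [t.1] else acc) acc)
      = fun acc p => acc ++ dataList.filter (fun z => key z == p) := by
    funext acc p; exact hstep p acc
  rw [hfun, PySem.List.foldl_append_eq_flatMap, List.nil_append]
  -- every matched item's key lies in the swept range
  have hbound : ∀ x ∈ dataList.filter
      (fun item => PySem.Str.isIn lq (PySem.Str.lower (pvName item))),
      key x ∈ PySem.List.pyRange 0 (maxPos + 1) := by
    intro x hx
    rw [PySem.List.mem_pyRange_one]
    have hxd : x ∈ dataList := List.mem_of_mem_filter hx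
    have hxin : PySem.Str.isIn lq (PySem.Str.lower (pvName x)) = true := (List.mem_filter.mp hx).2
    have hne : PySem.Str.find (PySem.Str.lower (pvName x)) lq ≠ -1 := by
      have h := pv_find_isIn (PySem.Str.lower (pvName x)) lq
      rw [hxin] at h
      exact of_decide_eq_true h
    constructor
    · simp only [hkey]
      rcases pv_find_cases (PySem.Str.lower (pvName x)) lq with h | h
      · exact absurd h hne
      · exact h
    · have hkx : key x ∈ dataList.map key := List.mem_map_of_mem hxd
      cases hm : PySem.List.max? (dataList.map key) (fun x => x) with
      | none =>
        rw [(PySem.List.max?_eq_none_iff _ _).mp hm] at hkx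
        exact absurd hkx (List.not_mem_nil)
      | some m =>
        have hle := PySem.List.max?_isMax hm (key x) hkx
        rw [hmax, hm]
        simp only [Option.getD_some]
        simp only [] at hle
        omega
  rw [pv_sorted_buckets key _ _ (PySem.List.pairwise_lt_pyRange_one 0 (maxPos + 1)) hbound]
  apply List.flatMap_congr
  intro p hp
  have hp0 : 0 ≤ p := (PySem.List.mem_pyRange_one.mp hp).1
  simp only [hkey]
  exact (pv_filter_matched dataList lq p hp0).symm
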